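-- pv_equiv track=rewrite | github.com/MrBrantCode/unitest_baseline | mut_generate/mist_train_cf/cf_76594/solution.py | sum_and_locations_of_primes
-- ===== SOURCE A (Python) =====
-- import math
--
-- def sum_and_locations_of_primes(matrix):
--     sum_of_primes = 0
--     locations_of_primes = []
--
--     def is_prime(n):
--         if n <= 1:
--             return False
--         if n == 2:
--             return True
--         if n % 2 == 0:
--             return False
--         for i in range(3, math.isqrt(n) + 1, 2):
--             if n % i == 0:
--                 return False
--         return True
--
--     for i, row in enumerate(matrix):
--         for j, num in enumerate(row):
--             if is_prime(num):
--                 sum_of_primes += num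
--                 locations_of_primes.append((i, j))
--
--     return sum_of_primes, locations_of_primes
-- ===== SOURCE B (Python) =====
-- import math
--
-- def sum_and_locations_of_primes(matrix):
--     mx = 0
--     for row in matrix:
--         for num in row:
--             if num > mx:
--                 mx = num
--     limit = math.isqrt(mx) if mx >= 2 else 1
--     sieve = [True] * (limit + 1)
--     sieve[0] = False
--     sieve[1] = False
--     for p in range(2, limit + 1):
--         if sieve[p]:
--             for q in range(p * p, limit + 1, p):
--                 sieve[q] = False
--     small_primes = [p for p in range(2, limit + 1) if sieve[p]]
--
--     total = 0
--     locations = []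
--     for i, row in enumerate(matrix):
--         for j, num in enumerate(row):
--             if num >= 2 and not any(num % p == 0 for p in small_primes if p * p <= num):
--                 total += num
--                 locations.append((i, j))
--     return total, locations
-- ===== Notes on version B (the rewrite author's own statement) =====
-- stated objective: alternative
-- what changed: A tests every entry independently by odd-step trial division up to isqrt(n); B first scans for the maximum entry, builds a Sieve of Eratosthenes up to isqrt(max) once, and then tests each entry by dividing only by the sieve's primes p with p*p <= entry.
import Mathlib
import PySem

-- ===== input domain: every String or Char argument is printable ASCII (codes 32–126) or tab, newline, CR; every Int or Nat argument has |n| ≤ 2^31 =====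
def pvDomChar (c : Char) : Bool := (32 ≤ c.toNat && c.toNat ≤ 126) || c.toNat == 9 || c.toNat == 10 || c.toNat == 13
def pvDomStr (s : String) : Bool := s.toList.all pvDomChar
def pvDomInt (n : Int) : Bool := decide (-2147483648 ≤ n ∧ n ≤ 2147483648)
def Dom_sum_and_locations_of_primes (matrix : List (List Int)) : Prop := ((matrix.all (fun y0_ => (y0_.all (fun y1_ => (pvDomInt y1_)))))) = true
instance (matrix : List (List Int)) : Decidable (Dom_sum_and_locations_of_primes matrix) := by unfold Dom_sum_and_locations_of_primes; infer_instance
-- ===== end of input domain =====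

-- B replaces A's per-entry odd-step trial division by a staged algorithm: one pass finds
-- the maximum entry, a Sieve of Eratosthenes collects the primes up to isqrt(max), and the
-- nested scan tests each entry by dividing only by those sieve primes (objective: alternative).

-- ===== PORT A =====
-- A's is_prime: special cases, then the early-return for-loop over range(3, isqrt(n)+1, 2)
-- is ported as `!(…).any`; math.isqrt(n) = Nat.sqrt n.toNat, exact since this branch has n ≥ 3.
def pvIsPrimeA (n : Int) : Bool :=
  if n ≤ 1 then false
  else if n = 2 then true
  else if PySem.Int.mod n 2 = 0 then false
  else !((PySem.List.pyRange 3 (((Nat.sqrt n.toNat : Int)) + 1) 2).any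
          (fun i => PySem.Int.mod n i == 0))

def sum_and_locations_of_primes (matrix : List (List Int)) : Int × (List (Int × Int)) :=
  (PySem.List.enumerate matrix 0).foldl
    (fun (acc : Int × List (Int × Int)) p =>
      (PySem.List.enumerate p.2 0).foldl
        (fun (acc2 : Int × List (Int × Int)) q =>
          if pvIsPrimeA q.2 then (acc2.1 + q.2, acc2.2 ++ [(p.1, q.1)]) else acc2)
        acc)
    (0, [])

-- ===== PORT B =====
-- Source B's max-finding double loop.
def pvMaxEntry (matrix : List (List Int)) : Int :=
  matrix.foldl (fun mx row => row.foldl (fun mx num => if mx < num then num else mx) mx) 0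

-- limit = math.isqrt(mx) if mx >= 2 else 1
def pvLimit (mx : Int) : Int := if 2 ≤ mx then ((Nat.sqrt mx.toNat : Nat) : Int) else 1

-- Source B's boolean sieve: [True]*(limit+1), sieve[0]=sieve[1]=False, then the marking loops.
def pvSieve (limit : Int) : List Bool :=
  let s0 := ((List.replicate (limit + 1).toNat true).set 0 false).set 1 false
  (PySem.List.pyRange 2 (limit + 1) 1).foldl
    (fun s p =>
      if s.getD p.toNat false then
        (PySem.List.pyRange (p * p) (limit + 1) p).foldl (fun s q => s.set q.toNat false) s
      else s) s0

-- small_primes = [p for p in range(2, limit+1) if sieve[p]]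
def pvSmallPrimes (limit : Int) (sieve : List Bool) : List Int :=
  (PySem.List.pyRange 2 (limit + 1) 1).filter (fun p => sieve.getD p.toNat false)

-- the scan's condition: num >= 2 and not any(num % p == 0 for p in small_primes if p*p <= num)
def pvCondB (smallPrimes : List Int) (num : Int) : Bool :=
  decide (2 ≤ num) && !(smallPrimes.any (fun p => decide (p * p ≤ num) && (PySem.Int.mod num p == 0)))

def sum_and_locations_of_primes_alt (matrix : List (List Int)) : Int × (List (Int × Int)) :=
  let limit := pvLimit (pvMaxEntry matrix)
  let smallPrimes := pvSmallPrimes limit (pvSieve limit)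
  (PySem.List.enumerate matrix 0).foldl
    (fun (acc : Int × List (Int × Int)) p =>
      (PySem.List.enumerate p.2 0).foldl
        (fun (acc2 : Int × List (Int × Int)) q =>
          if pvCondB smallPrimes q.2 then (acc2.1 + q.2, acc2.2 ++ [(p.1, q.1)]) else acc2)
        acc)
    (0, [])

-- ===== PRECONDITION & SPEC =====
def Spec_sum_and_locations_of_primes (matrix : List (List Int)) (out : Int × (List (Int × Int))) : Prop := out = sum_and_locations_of_primes_alt matrix
instance (matrix : List (List Int)) (out : Int × (List (Int × Int))) : Decidable (Spec_sum_and_locations_of_primes matrix out) := by unfold Spec_sum_and_locations_of_primes; infer_instance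

-- ===== CLAIM (what is proved, stated in full; the proofs are below) =====
def Claim_equal_sum_and_locations_of_primes : Prop := ∀ (matrix : List (List Int)), Dom_sum_and_locations_of_primes matrix → Spec_sum_and_locations_of_primes matrix (sum_and_locations_of_primes matrix)

-- ===== LEMMAS AND PROOFS =====

-- A's primality test is exactly "n ≥ 2 with no divisor d, 2 ≤ d, d² ≤ n".
theorem pvIsPrimeA_iff (n : Int) :
    pvIsPrimeA n = true ↔ 2 ≤ n ∧ ∀ d : Int, 2 ≤ d → d * d ≤ n → ¬ d ∣ n := by
  by_cases hn1 : n ≤ 1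
  · simp only [pvIsPrimeA, if_pos hn1, Bool.false_eq_true, false_iff]
    intro ⟨h, _⟩; omega
  by_cases hn2 : n = 2
  · subst hn2
    constructor
    · intro _
      exact ⟨le_refl 2, fun d hd hdd _ => absurd hdd (by nlinarith)⟩
    · intro _; decide
  by_cases he : PySem.Int.mod n 2 = 0
  · have h2 : (2:Int) ∣ n := (PySem.Int.mod_eq_zero_iff_dvd n 2).1 he
    have hn4 : 4 ≤ n := by obtain ⟨k, hk⟩ := h2; omega
    simp only [pvIsPrimeA, if_neg hn1, if_neg hn2, if_pos he, Bool.false_eq_true, false_iff]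
    intro ⟨_, H⟩
    exact H 2 (by norm_num) (by omega) h2
  · have hn3 : 3 ≤ n := by omega
    have hodd : ¬ (2:Int) ∣ n := fun h => he ((PySem.Int.mod_eq_zero_iff_dvd n 2).2 h)
    simp only [pvIsPrimeA, if_neg hn1, if_neg hn2, if_neg he, Bool.not_eq_eq_eq_not,
      Bool.not_true, List.any_eq_false, beq_iff_eq,
      PySem.List.mem_pyRange_iff_of_pos (by norm_num : (0:Int) < 2)]
    constructor
    · intro H
      refine ⟨by omega, fun d hd hdd hdvd => ?_⟩
      by_cases hpar : (2:Int) ∣ d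
      · exact hodd (dvd_trans hpar hdvd)
      · have hd3 : 3 ≤ d := by omega
        have hd0 : ((d.toNat : Int)) = d := Int.toNat_of_nonneg (by omega)
        have hds : d.toNat * d.toNat ≤ n.toNat := by
          have h1 : (d.toNat : Int) * (d.toNat : Int) ≤ (n.toNat : Int) := by
            rw [hd0]; omega
          exact_mod_cast h1
        have hsq : d.toNat ≤ Nat.sqrt n.toNat := Nat.le_sqrt.2 hds
        have hlt : d < (Nat.sqrt n.toNat : Int) + 1 := by omega
        exact H d ⟨hd3, hlt, by omega⟩ ((PySem.Int.mod_eq_zero_iff_dvd n d).2 hdvd)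
    · rintro ⟨_, H⟩ i ⟨hi3, hilt, hpar⟩ hmod
      have hdvd : i ∣ n := (PySem.Int.mod_eq_zero_iff_dvd n i).1 hmod
      have hsq : i.toNat ≤ Nat.sqrt n.toNat := by omega
      have hds : i.toNat * i.toNat ≤ n.toNat := Nat.le_sqrt.1 hsq
      have hi0 : ((i.toNat : Int)) = i := Int.toNat_of_nonneg (by omega)
      have hii : i * i ≤ n := by
        have h1 : (i.toNat : Int) * (i.toNat : Int) ≤ (n.toNat : Int) := by exact_mod_cast hds
        rw [hi0] at h1; omega
      exact H i (by omega) hii hdvd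

-- the max loop bounds every entry
theorem pv_inner_le (row : List Int) : ∀ a : Int,
    a ≤ row.foldl (fun mx num => if mx < num then num else mx) a := by
  induction row with
  | nil => intro a; simp
  | cons x xs ih =>
    intro a
    refine le_trans ?_ (ih (if a < x then x else a))
    split_ifs with h <;> omega

theorem pv_inner_mem (row : List Int) : ∀ a : Int, ∀ num ∈ row,
    num ≤ row.foldl (fun mx num => if mx < num then num else mx) a := by
  induction row with
  | nil => intro a num h; cases h
  | cons x xs ih =>
    intro a num h
    rcases List.mem_cons.1 h with he | hm
    · subst he
      refine le_trans ?_ (pv_inner_le xs (if a < num then num else a))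
      split_ifs with h <;> omega
    · exact ih _ num hm

theorem pv_outer_le (rows : List (List Int)) : ∀ a : Int,
    a ≤ rows.foldl (fun mx row => row.foldl (fun mx num => if mx < num then num else mx) mx) a := by
  induction rows with
  | nil => intro a; simp
  | cons r rs ih =>
    intro a
    exact le_trans (pv_inner_le r a) (ih _)

theorem pvMaxEntry_bound (matrix : List (List Int)) :
    ∀ row ∈ matrix, ∀ num ∈ row, num ≤ pvMaxEntry matrix := by
  unfold pvMaxEntry
  generalize (0 : Int) = a
  induction matrix generalizing a with
  | nil => intro row h; cases h
  | cons r rs ih =>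
    intro row h num hn
    rcases List.mem_cons.1 h with he | hm
    · subst he
      exact le_trans (pv_inner_mem row a num hn) (pv_outer_le rs _)
    · exact ih _ row hm num hn

-- the sieve never clears a prime index
theorem pv_mark_prime (l : List Int) (hl : ∀ q ∈ l, ¬ Nat.Prime q.toNat) :
    ∀ (s : List Bool) (k : Nat), Nat.Prime k →
      (l.foldl (fun s q => s.set q.toNat false) s).getD k false = s.getD k false := by
  induction l with
  | nil => intro s k _; rfl
  | cons q qs ih =>
    intro s k hk
    have hq : q.toNat ≠ k := fun h => hl q (List.mem_cons_self ..) (h ▸ hk)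
    rw [List.foldl_cons, ih (fun x hx => hl x (List.mem_cons_of_mem _ hx)) _ k hk]
    unfold List.getD
    rw [List.getElem?_set_ne hq]

theorem pv_outer_prime (limit : Int) (l : List Int) (hl : ∀ p ∈ l, 2 ≤ p) :
    ∀ (s : List Bool) (k : Nat), Nat.Prime k →
      (l.foldl (fun s p =>
          if s.getD p.toNat false then
            (PySem.List.pyRange (p * p) (limit + 1) p).foldl (fun s q => s.set q.toNat false) s
          else s) s).getD k false = s.getD k false := by
  induction l with
  | nil => intro s k _; rfl
  | cons p ps ih =>
    intro s k hk
    have hp2 : 2 ≤ p := hl p (List.mem_cons_self ..)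
    rw [List.foldl_cons, ih (fun x hx => hl x (List.mem_cons_of_mem _ hx)) _ k hk]
    split_ifs with h
    · refine pv_mark_prime _ ?_ s k hk
      intro q hq
      rw [PySem.List.mem_pyRange_iff_of_pos (by omega : (0:Int) < p)] at hq
      obtain ⟨hq1, hq2, t, ht⟩ := hq
      -- q = p*p + p*t = p*(p+t)
      have hq0 : q = p * (p + t) := by ring_nf; ring_nf at ht; omega
      have ht0 : 2 ≤ p + t := by nlinarith
      have hqn : q.toNat = p.toNat * (p + t).toNat := by
        rw [hq0, Int.toNat_mul (by omega) (by omega)]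
      rw [hqn]
      exact Nat.not_prime_mul (by omega) (by omega)
    · rfl

theorem pvSieve_prime (limit : Int) (k : Nat) (hk : (k : Int) ≤ limit) (hp : Nat.Prime k) :
    (pvSieve limit).getD k false = true := by
  unfold pvSieve
  rw [pv_outer_prime limit _ (fun p hp => ((PySem.List.mem_pyRange_one).1 hp).1) _ k hp]
  have hk2 : 2 ≤ k := hp.two_le
  have hlen : k < (limit + 1).toNat := by omega
  unfold List.getD
  rw [List.getElem?_set_ne (by omega : 1 ≠ k), List.getElem?_set_ne (by omega : 0 ≠ k)]
  simp [hlen]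

-- B's per-entry condition equals A's primality test for entries bounded by the scanned max
theorem pvCond_eq (mx num : Int) (hle : num ≤ mx) :
    pvCondB (pvSmallPrimes (pvLimit mx) (pvSieve (pvLimit mx))) num = pvIsPrimeA num := by
  by_cases h2 : 2 ≤ num
  · have hmx : 2 ≤ mx := le_trans h2 hle
    have hL : pvLimit mx = ((Nat.sqrt mx.toNat : Nat) : Int) := by
      unfold pvLimit; rw [if_pos hmx]
    rw [Bool.eq_iff_iff, pvIsPrimeA_iff]
    simp only [pvCondB, pvSmallPrimes, Bool.and_eq_true, decide_eq_true_eq,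
      Bool.not_eq_eq_eq_not, Bool.not_true, List.any_eq_false, List.mem_filter,
      beq_iff_eq, PySem.List.mem_pyRange_one, and_imp, not_and]
    constructor
    · rintro ⟨-, H⟩
      refine ⟨h2, fun d hd hdd hdvd => ?_⟩
      have hnum1 : num.toNat ≠ 1 := by omega
      set q := Nat.minFac num.toNat with hq
      have hqp : Nat.Prime q := Nat.minFac_prime hnum1
      have hdn : d.toNat ∣ num.toNat := by
        have hd0 : ((d.toNat : Int)) = d := Int.toNat_of_nonneg (by omega)
        have hn0 : ((num.toNat : Int)) = num := Int.toNat_of_nonneg (by omega)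
        rw [← Int.natCast_dvd_natCast, hd0, hn0]; exact hdvd
      have hqd : q ≤ d.toNat := Nat.minFac_le_of_dvd (by omega) hdn
      have hdds : d.toNat * d.toNat ≤ num.toNat := by
        have hd0 : ((d.toNat : Int)) = d := Int.toNat_of_nonneg (by omega)
        have h1 : (d.toNat : Int) * (d.toNat : Int) ≤ (num.toNat : Int) := by
          rw [hd0]; omega
        exact_mod_cast h1
      have hqq : q * q ≤ num.toNat := le_trans (Nat.mul_le_mul hqd hqd) hdds
      have hqs : q ≤ Nat.sqrt mx.toNat := Nat.le_sqrt.2 (le_trans hqq (by omega))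
      have hqL : ((q : Int)) ≤ pvLimit mx := by rw [hL]; exact_mod_cast hqs
      have hqdvd : ((q : Int)) ∣ num := by
        have hn0 : ((num.toNat : Int)) = num := Int.toNat_of_nonneg (by omega)
        rw [← hn0]; exact_mod_cast Nat.minFac_dvd num.toNat
      have hqqn : ((q : Int)) * ((q : Int)) ≤ num := by
        have h1 : ((q * q : Nat) : Int) ≤ ((num.toNat : Nat) : Int) := by exact_mod_cast hqq
        push_cast at h1; omega
      have hsv : (pvSieve (pvLimit mx)).getD ((q : Int)).toNat false = true := by
        rw [Int.toNat_natCast]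
        exact pvSieve_prime (pvLimit mx) q hqL hqp
      have hmem := H ((q : Int)) (by exact_mod_cast hqp.two_le) (by omega) (by simpa using hsv) hqqn
      rw [PySem.Int.mod_eq_zero_iff_dvd] at hmem
      exact absurd hqdvd hmem
    · rintro ⟨-, H⟩
      exact ⟨h2, fun p hp _ _ hpp hmod =>
        H p hp hpp ((PySem.Int.mod_eq_zero_iff_dvd num p).1 hmod)⟩
  · have hA : pvIsPrimeA num = false := by
      unfold pvIsPrimeA; rw [if_pos (by omega : num ≤ 1)]
    simp [pvCondB, h2, hA]

-- ===== VERDICT (by name: the statement is the Claim_ definition above) =====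
theorem sum_and_locations_of_primes_spec : Claim_equal_sum_and_locations_of_primes := by
  intro matrix _
  unfold Spec_sum_and_locations_of_primes sum_and_locations_of_primes sum_and_locations_of_primes_alt
  apply PySem.List.foldl_congr_mem
  intro acc ip hip
  apply PySem.List.foldl_congr_mem
  intro acc2 jq hjq
  have hrow : ip.2 ∈ matrix := by
    have := PySem.List.map_snd_enumerate matrix (0 : Int)
    rw [← this]; exact List.mem_map_of_mem hip
  have hnum : jq.2 ∈ ip.2 := by
    have := PySem.List.map_snd_enumerate ip.2 (0 : Int)
    rw [← this]; exact List.mem_map_of_mem hjq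
  rw [pvCond_eq (pvMaxEntry matrix) jq.2 (pvMaxEntry_bound matrix ip.2 hrow jq.2 hnum)]
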